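-- pv_equiv track=rewrite | github.com/pypi-data/pypi-mirror-206 | packages/GenBioX/GenBioX-0.3.1.tar.gz/GenBioX-0.3.1/GenBioX/comparative_genomics/identify_conserved_regions.py | identify_conserved_regions
-- ===== SOURCE A (Python) =====
-- def identify_conserved_regions(genomes):
--     """
--     Identifies conserved regions between two or more genomes
--
--     Parameters:
--     genomes (list): List of genome sequences in string format
--
--     Returns:
--     conserved_regions (list): List of tuples representing the start and end positions of conserved regions
--     """
--     # Compute the minimum length of all genomes
--     min_length = min(len(genome) for genome in genomes)
--
--     # Iterate over each position in the first genome
--     conserved_regions = []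
--     for i in range(min_length):
--         # Check if the nucleotides at this position are the same in all genomes
--         if all(genome[i] == genomes[0][i] for genome in genomes):
--             # If they are, extend the current conserved region
--             if not conserved_regions or i != conserved_regions[-1][1] + 1:
--                 conserved_regions.append((i, i))
--             else:
--                 conserved_regions[-1] = (conserved_regions[-1][0], i)
--
--     return conserved_regions
-- ===== SOURCE B (Python) =====
-- def identify_conserved_regions(genomes):
--     min_length = min(len(genome) for genome in genomes)
--     g0 = genomes[0]
--     # collect every position where some genome disagrees with the first genome
--     mismatches = set()
--     for genome in genomes:
--         for i in range(min_length):
--             if genome[i] != g0[i]: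
--                 mismatches.add(i)
--     # conserved regions are exactly the gaps between consecutive mismatch
--     # positions (sentinel min_length closes the final gap)
--     regions = []
--     prev = -1
--     for b in sorted(mismatches) + [min_length]:
--         if b > prev + 1:
--             regions.append((prev + 1, b - 1))
--         prev = b
--     return regions
-- ===== Notes on version B (the rewrite author's own statement) =====
-- stated objective: alternative
-- what changed: B inverts the problem: it loops genome-by-genome collecting the SET of mismatch positions, then emits the conserved regions as the gaps between consecutive sorted mismatch positions (with a sentinel), instead of A's position-by-position scan that appends to or extends the last region in place.
import Mathlib
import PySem

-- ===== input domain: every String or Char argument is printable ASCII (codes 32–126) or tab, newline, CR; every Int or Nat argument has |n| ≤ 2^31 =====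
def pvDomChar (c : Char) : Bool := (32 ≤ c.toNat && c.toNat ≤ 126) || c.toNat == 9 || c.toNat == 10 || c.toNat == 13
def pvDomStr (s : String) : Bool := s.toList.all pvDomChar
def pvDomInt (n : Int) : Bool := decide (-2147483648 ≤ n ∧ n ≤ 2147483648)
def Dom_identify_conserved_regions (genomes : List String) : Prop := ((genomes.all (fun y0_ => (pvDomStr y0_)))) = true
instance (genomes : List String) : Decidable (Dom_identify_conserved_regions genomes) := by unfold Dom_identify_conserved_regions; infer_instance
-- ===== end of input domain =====

-- B collects the set of mismatch positions genome-by-genome and emits conserved regions as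
-- the gaps between consecutive sorted mismatches, instead of A's position scan that extends
-- the last region in place; same return value, a different algorithm ('alternative').

-- ===== PORT A =====
def identify_conserved_regions (genomes : List String) : List (Int × Int) :=
  match genomes with
  | [] => []   -- Python: min() of empty generator raises ValueError; excluded by Pre_
  | g0 :: rest =>
    let min_length : Int := (rest.map PySem.Str.len).foldl min (PySem.Str.len g0)
    (PySem.List.pyRange 0 min_length 1).foldl
      (fun cr i =>
        if (g0 :: rest).all (fun g => PySem.Str.pyGet? g i == PySem.Str.pyGet? g0 i) then
          match cr.getLast? with
          | none => cr ++ [(i, i)]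
          | some (a, b) => if i ≠ b + 1 then cr ++ [(i, i)] else cr.dropLast ++ [(a, i)]
        else cr)
      []

-- ===== PORT B =====
def identify_conserved_regions_alt (genomes : List String) : List (Int × Int) :=
  match genomes with
  | [] => []   -- Python: min() of empty generator raises ValueError; excluded by Pre_
  | g0 :: rest =>
    let min_length : Int := (rest.map PySem.Str.len).foldl min (PySem.Str.len g0)
    -- mismatches: set built genome-by-genome
    let mismatches : PySem.Set Int :=
      (g0 :: rest).foldl
        (fun s genome =>
          (PySem.List.pyRange 0 min_length 1).foldl
            (fun s i =>
              if !(PySem.Str.pyGet? genome i == PySem.Str.pyGet? g0 i) then PySem.Set.add s i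
              else s)
            s)
        PySem.Set.empty
    -- gaps between consecutive sorted mismatch positions (sentinel min_length)
    let res :=
      (PySem.List.sorted mismatches (fun x => x) false ++ [min_length]).foldl
        (fun (st : List (Int × Int) × Int) b =>
          if b > st.2 + 1 then (st.1 ++ [(st.2 + 1, b - 1)], b) else (st.1, b))
        ([], -1)
    res.1

-- ===== PRECONDITION & SPEC =====
-- Pre_ excludes only the empty genome list, on which Python's min() raises ValueError (in both A and B).
def Pre_identify_conserved_regions (genomes : List String) : Prop := genomes ≠ []
instance (genomes : List String) : Decidable (Pre_identify_conserved_regions genomes) := by unfold Pre_identify_conserved_regions; infer_instance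
def pvWitness_identify_conserved_regions : List String := ["ACGT", "ACCT"]

def Spec_identify_conserved_regions (genomes : List String) (out : List (Int × Int)) : Prop := out = identify_conserved_regions_alt genomes
instance (genomes : List String) (out : List (Int × Int)) : Decidable (Spec_identify_conserved_regions genomes out) := by unfold Spec_identify_conserved_regions; infer_instance

-- ===== CLAIM (what is proved, stated in full; the proofs are below) =====
def Claim_equal_identify_conserved_regions : Prop := ∀ (genomes : List String), Dom_identify_conserved_regions genomes → Pre_identify_conserved_regions genomes → Spec_identify_conserved_regions genomes (identify_conserved_regions genomes)

-- ===== LEMMAS AND PROOFS =====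

-- A's result: grouping of the matching positions into runs
def pvGroupRuns : List Int → Option (Int × Int) → List (Int × Int)
  | [], none => []
  | [], some run => [run]
  | i :: rest, none => pvGroupRuns rest (some (i, i))
  | i :: rest, some (s, p) =>
    if i = p + 1 then pvGroupRuns rest (some (s, i))
    else (s, p) :: pvGroupRuns rest (some (i, i))

-- B's result: gaps between consecutive mismatch positions
def pvGaps : List Int → Int → List (Int × Int)
  | [], _ => []
  | b :: rest, prev => if prev + 1 < b then (prev + 1, b - 1) :: pvGaps rest b else pvGaps rest b

-- A's unconditional step (applied exactly at the matching positions)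
def pvStepA (cr : List (Int × Int)) (i : Int) : List (Int × Int) :=
  match cr.getLast? with
  | none => cr ++ [(i, i)]
  | some (a, b) => if i ≠ b + 1 then cr ++ [(i, i)] else cr.dropLast ++ [(a, i)]

lemma pvStepA_concat (acc : List (Int × Int)) (s p i : Int) :
    pvStepA (acc ++ [(s, p)]) i =
      if i = p + 1 then acc ++ [(s, i)] else (acc ++ [(s, p)]) ++ [(i, i)] := by
  simp [pvStepA]

lemma pvFoldA_group (l : List Int) : ∀ (acc : List (Int × Int)) (s p : Int),
    l.foldl pvStepA (acc ++ [(s, p)]) = acc ++ pvGroupRuns l (some (s, p)) := by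
  induction l with
  | nil => intro acc s p; simp [pvGroupRuns]
  | cons i rest ih =>
    intro acc s p
    simp only [List.foldl_cons, pvStepA_concat, pvGroupRuns]
    by_cases h : i = p + 1
    · simp [h, ih]
    · simpa [h] using ih (acc ++ [(s, p)]) i i

lemma pvFoldA_group_nil (l : List Int) :
    l.foldl pvStepA [] = pvGroupRuns l none := by
  cases l with
  | nil => rfl
  | cons i rest =>
    have h0 : pvStepA [] i = [] ++ [(i, i)] := by simp [pvStepA]
    simp only [List.foldl_cons, h0, pvGroupRuns]
    exact pvFoldA_group rest [] i i

-- B's fold over the sorted mismatches computes pvGaps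
lemma pvFoldB_gaps (l : List Int) : ∀ (acc : List (Int × Int)) (prev : Int),
    (l.foldl
      (fun (st : List (Int × Int) × Int) b =>
        if b > st.2 + 1 then (st.1 ++ [(st.2 + 1, b - 1)], b) else (st.1, b))
      (acc, prev)).1 = acc ++ pvGaps l prev := by
  induction l with
  | nil => intro acc prev; simp [pvGaps]
  | cons b rest ih =>
    intro acc prev
    simp only [List.foldl_cons, pvGaps]
    by_cases h : prev + 1 < b
    · have hb : b > prev + 1 := h
      simp only [if_pos hb, ih]
      simp
    · have hb : ¬ b > prev + 1 := h
      simp only [if_neg hb, ih]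

-- skipping a closed run
lemma pvGroupRuns_skip (l : List Int) (s p : Int) (h : ∀ i ∈ l, p + 1 < i) :
    pvGroupRuns l (some (s, p)) = (s, p) :: pvGroupRuns l none := by
  cases l with
  | nil => rfl
  | cons i rest =>
    have : i ≠ p + 1 := by have := h i (by simp); omega
    simp [pvGroupRuns, this]

-- the heart: gaps between mismatches = runs of matches, over a consecutive range
lemma pvGaps_eq_groupRuns (P : Int → Bool) :
    ∀ (k : Nat) (a : Int),
      (pvGaps ((PySem.List.pyRange a (a + k) 1).filter (fun i => !P i) ++ [a + k]) (a - 1)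
        = pvGroupRuns ((PySem.List.pyRange a (a + k) 1).filter (fun i => P i)) none)
      ∧ (∀ s0, s0 ≤ a - 1 →
        pvGaps ((PySem.List.pyRange a (a + k) 1).filter (fun i => !P i) ++ [a + k]) (s0 - 1)
          = pvGroupRuns ((PySem.List.pyRange a (a + k) 1).filter (fun i => P i)) (some (s0, a - 1))) := by
  intro k
  induction k with
  | zero =>
    intro a
    constructor
    · simp [PySem.List.pyRange_one_eq_nil (by omega : a + (0:Nat) ≤ a), pvGaps, pvGroupRuns]
    · intro s0 hs
      simp [PySem.List.pyRange_one_eq_nil (by omega : a + (0:Nat) ≤ a), pvGaps, pvGroupRuns]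
      omega
  | succ k ih =>
    intro a
    have hlt : a < a + ((k + 1 : Nat) : Int) := by push_cast; omega
    have hcons := PySem.List.pyRange_one_cons hlt
    have hend : a + ((k + 1 : Nat) : Int) = (a + 1) + (k : Nat) := by push_cast; ring
    constructor
    · rw [hcons]
      by_cases hP : P a = true
      · simp only [List.filter_cons, hP, Bool.not_true, Bool.false_eq_true, eq_self_iff_true, if_true, if_false, reduceIte]
        rw [hend, pvGroupRuns]
        have := (ih (a + 1)).2 a (by omega)
        simpa using this
      · have hP' : P a = false := by simpa using hP
        simp only [List.filter_cons, hP', Bool.not_false, Bool.false_eq_true, eq_self_iff_true, if_true, if_false, reduceIte]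
        rw [hend]
        have hstep : pvGaps (a :: ((PySem.List.pyRange (a+1) ((a+1) + (k:Nat)) 1).filter (fun i => !P i) ++ [(a+1) + (k:Nat)])) (a - 1)
            = pvGaps ((PySem.List.pyRange (a+1) ((a+1) + (k:Nat)) 1).filter (fun i => !P i) ++ [(a+1) + (k:Nat)]) a := by
          rw [pvGaps]; simp
        rw [List.cons_append, hstep]
        have := (ih (a + 1)).1
        simpa using this
    · intro s0 hs
      rw [hcons]
      by_cases hP : P a = true
      · simp only [List.filter_cons, hP, Bool.not_true, Bool.false_eq_true, eq_self_iff_true, if_true, if_false, reduceIte]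
        rw [hend, pvGroupRuns, if_pos (by omega : a = (a - 1) + 1)]
        have := (ih (a + 1)).2 s0 (by omega)
        simpa using this
      · have hP' : P a = false := by simpa using hP
        simp only [List.filter_cons, hP', Bool.not_false, Bool.false_eq_true, eq_self_iff_true, if_true, if_false, reduceIte]
        rw [hend]
        have hstep : pvGaps (a :: ((PySem.List.pyRange (a+1) ((a+1) + (k:Nat)) 1).filter (fun i => !P i) ++ [(a+1) + (k:Nat)])) (s0 - 1)
            = (s0, a - 1) :: pvGaps ((PySem.List.pyRange (a+1) ((a+1) + (k:Nat)) 1).filter (fun i => !P i) ++ [(a+1) + (k:Nat)]) a := by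
          rw [pvGaps, if_pos (by omega : s0 - 1 + 1 < a)]; simp
        rw [List.cons_append, hstep]
        rw [pvGroupRuns_skip _ s0 (a - 1) ?side]
        · have := (ih (a + 1)).1
          simp only [show (a + 1) - 1 = a from by ring] at this
          rw [this]
        case side =>
          intro i hi
          have := (List.mem_filter.mp hi).1
          have := (PySem.List.mem_pyRange_one.mp this).1
          omega

-- the mismatch set: membership and nodup
lemma pvInner_mem (g g0 : String) (r : List Int) (s : PySem.Set Int) (y : Int) :
    y ∈ r.foldl
        (fun s i =>
          if !(PySem.Str.pyGet? g i == PySem.Str.pyGet? g0 i) then PySem.Set.add s i else s)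
        s
      ↔ y ∈ s ∨ (y ∈ r ∧ ¬(PySem.Str.pyGet? g y == PySem.Str.pyGet? g0 y) = true) := by
  induction r generalizing s with
  | nil => simp
  | cons i rest ih =>
    simp only [List.foldl_cons]
    split
    next h =>
      have hm : ¬(PySem.Str.pyGet? g i == PySem.Str.pyGet? g0 i) = true := by
        simpa using h
      rw [ih]
      simp only [PySem.Set.mem_add, List.mem_cons]
      constructor
      · rintro ((hy | rfl) | hy)
        · exact Or.inl hy
        · exact Or.inr ⟨Or.inl rfl, hm⟩
        · exact Or.inr ⟨Or.inr hy.1, hy.2⟩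
      · rintro (hy | ⟨(rfl | hy), hm'⟩)
        · exact Or.inl (Or.inl hy)
        · exact Or.inl (Or.inr rfl)
        · exact Or.inr ⟨hy, hm'⟩
    next h =>
      have hm : (PySem.Str.pyGet? g i == PySem.Str.pyGet? g0 i) = true := by
        simpa using h
      rw [ih]
      simp only [List.mem_cons]
      constructor
      · rintro (hy | hy)
        · exact Or.inl hy
        · exact Or.inr ⟨Or.inr hy.1, hy.2⟩
      · rintro (hy | ⟨(rfl | hy), hm'⟩)
        · exact Or.inl hy
        · exact absurd hm hm'
        · exact Or.inr ⟨hy, hm'⟩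

lemma pvInner_nodup (g g0 : String) (r : List Int) (s : PySem.Set Int) (hs : s.Nodup) :
    (r.foldl
        (fun s i =>
          if !(PySem.Str.pyGet? g i == PySem.Str.pyGet? g0 i) then PySem.Set.add s i else s)
        s).Nodup := by
  induction r generalizing s with
  | nil => exact hs
  | cons i rest ih =>
    simp only [List.foldl_cons]
    split
    · exact ih _ (PySem.Set.nodup_add _ _ hs)
    · exact ih _ hs

lemma pvBad_mem (g0 : String) (gl : List String) (r : List Int) (s : PySem.Set Int) (y : Int) :
    y ∈ gl.foldl
        (fun s genome =>
          r.foldl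
            (fun s i =>
              if !(PySem.Str.pyGet? genome i == PySem.Str.pyGet? g0 i) then PySem.Set.add s i else s)
            s)
        s
      ↔ y ∈ s ∨ (y ∈ r ∧ ∃ g ∈ gl, ¬(PySem.Str.pyGet? g y == PySem.Str.pyGet? g0 y) = true) := by
  induction gl generalizing s with
  | nil => simp
  | cons g gl ih =>
    simp only [List.foldl_cons, ih, pvInner_mem]
    constructor
    · rintro ((hy | ⟨hr, hm⟩) | ⟨hr, g', hg', hm⟩)
      · exact Or.inl hy
      · exact Or.inr ⟨hr, g, by simp, hm⟩
      · exact Or.inr ⟨hr, g', by simp [hg'], hm⟩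
    · rintro (hy | ⟨hr, g', hg', hm⟩)
      · exact Or.inl (Or.inl hy)
      · rcases List.mem_cons.mp hg' with rfl | hg'
        · exact Or.inl (Or.inr ⟨hr, hm⟩)
        · exact Or.inr ⟨hr, g', hg', hm⟩

lemma pvBad_nodup (g0 : String) (gl : List String) (r : List Int) (s : PySem.Set Int) (hs : s.Nodup) :
    (gl.foldl
        (fun s genome =>
          r.foldl
            (fun s i =>
              if !(PySem.Str.pyGet? genome i == PySem.Str.pyGet? g0 i) then PySem.Set.add s i else s)
            s)
        s).Nodup := by
  induction gl generalizing s with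
  | nil => exact hs
  | cons g gl ih => exact ih _ (pvInner_nodup _ _ _ _ hs)

-- min of nonneg lengths is nonneg
lemma pvMinLen_nonneg (x : Int) (l : List Int) (hx : 0 ≤ x) (hl : ∀ y ∈ l, 0 ≤ y) :
    0 ≤ l.foldl min x := by
  induction l generalizing x with
  | nil => exact hx
  | cons y rest ih =>
    exact ih (min x y) (le_min hx (hl y (by simp))) (fun z hz => hl z (by simp [hz]))

-- ===== VERDICT (by name: the statement is the Claim_ definition above) =====
theorem identify_conserved_regions_spec : Claim_equal_identify_conserved_regions := by
  intro genomes _ hpre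
  unfold Spec_identify_conserved_regions
  match genomes with
  | [] => exact absurd rfl hpre
  | g0 :: rest =>
    simp only [identify_conserved_regions, identify_conserved_regions_alt]
    rw [show (fun (cr : List (Int × Int)) (i : Int) =>
        if (g0 :: rest).all (fun g => PySem.Str.pyGet? g i == PySem.Str.pyGet? g0 i) then
          match cr.getLast? with
          | none => cr ++ [(i, i)]
          | some (a, b) => if i ≠ b + 1 then cr ++ [(i, i)] else cr.dropLast ++ [(a, i)]
        else cr) =
      (fun cr i =>
        if (g0 :: rest).all (fun g => PySem.Str.pyGet? g i == PySem.Str.pyGet? g0 i) then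
          pvStepA cr i else cr) from by
        funext cr i; simp [pvStepA]]
    rw [PySem.List.foldl_if_eq_foldl_filter, pvFoldA_group_nil, pvFoldB_gaps]
    set n : Int := (rest.map PySem.Str.len).foldl min (PySem.Str.len g0) with hn
    have hn0 : 0 ≤ n := by
      apply pvMinLen_nonneg
      · simp [PySem.Str.len]
      · intro y hy
        rcases List.mem_map.mp hy with ⟨s, _, rfl⟩
        simp [PySem.Str.len]
    -- the sorted mismatch set is the range filtered to the non-all-match positions
    have hiff : ∀ y : Int,
        ((!(g0 :: rest).all (fun g => PySem.Str.pyGet? g y == PySem.Str.pyGet? g0 y)) = true)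
          ↔ ∃ g ∈ g0 :: rest, ¬(PySem.Str.pyGet? g y == PySem.Str.pyGet? g0 y) = true := by
      intro y
      simp [List.all_eq_false]
    have hsorted : PySem.List.sorted
        ((g0 :: rest).foldl
          (fun s genome =>
            (PySem.List.pyRange 0 n 1).foldl
              (fun s i =>
                if !(PySem.Str.pyGet? genome i == PySem.Str.pyGet? g0 i) then PySem.Set.add s i else s)
              s)
          PySem.Set.empty) (fun x => x) false
        = (PySem.List.pyRange 0 n 1).filter
            (fun i => !(g0 :: rest).all (fun g => PySem.Str.pyGet? g i == PySem.Str.pyGet? g0 i)) := by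
      apply PySem.List.sorted_eq_of_perm_of_pairwise_lt
      · apply (List.perm_ext_iff_of_nodup ?h1 ?h2).mpr
        · intro y
          rw [List.mem_filter, pvBad_mem, hiff y]
          have hempty : ¬ y ∈ (PySem.Set.empty : PySem.Set Int) := by
            simp [PySem.Set.empty]
          tauto
        case h1 => exact List.Nodup.filter _ (PySem.List.nodup_pyRange_one 0 n)
        case h2 => exact pvBad_nodup _ _ _ _ (by simp [PySem.Set.empty])
      · exact List.Pairwise.filter _ (PySem.List.pairwise_lt_pyRange_one 0 n)
    rw [hsorted]
    -- conclude with the gaps/runs correspondence on the range [0, n)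
    have := (pvGaps_eq_groupRuns
      (fun i => (g0 :: rest).all (fun g => PySem.Str.pyGet? g i == PySem.Str.pyGet? g0 i))
      n.toNat 0).1
    simp only [show ((0 : Int) + (n.toNat : Int)) = n from by omega,
      show ((0 : Int) - 1) = (-1 : Int) from by ring] at this
    simpa using this.symm
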